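-- pv_equiv track=rewrite | github.com/depebul/AGH | ASD/zad2/zad2.py | ksum
-- ===== SOURCE A (Python) =====
-- def ksum(T, k, p):
--     n = len(T)
--     ind = 0
--     templist = makelist(T,p)
--     sum = templist[p - k]
--     i = 0
--     while i + p < n:
--         templist = changelist(T,i,templist,p)
--         i += 1
--         sum += templist[p - k]
--     return(sum)
--
-- def changelist(T, i, templist, p):
--     the_ind = binary_search(templist, T[i])
--     del templist[the_ind]
--     templist.insert(binary_search(templist, T[p + i]), T[p + i])
--     return templist
--
-- def binary_search(arr, target):
--     left, right = 0, len(arr) - 1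
--     while left <= right:
--         mid = (left + right) // 2
--         if arr[mid] == target:
--             return mid
--         elif arr[mid] < target:
--             left = mid + 1
--         else:
--             right = mid - 1
--     return left
--
-- def quick_sort(arr):
--     if len(arr) <= 1:
--         return arr
--     else:
--         pivot = arr[0]
--         less_than_pivot = [x for x in arr[1:] if x <= pivot]
--         greater_than_pivot = [x for x in arr[1:] if x > pivot]
--         return quick_sort(less_than_pivot) + [pivot] + quick_sort(greater_than_pivot)
--
-- def makelist(T,p):
--     i = 0
--     templist = []
--     while i < p:
--         templist.append(T[i])
--         i += 1
--     return quick_sort(templist)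
-- ===== SOURCE B (Python) =====
-- def ksum(T, k, p):
--     n = len(T)
--     total = 0
--     for s in range(n - p + 1):
--         window = sorted(T[s:s + p])
--         total += window[p - k]
--     return total
-- ===== Notes on version B (the rewrite author's own statement) =====
-- stated objective: simpler
-- what changed: A maintains a sorted sliding window incrementally (hand-written quicksort to build it, then binary-search delete/insert per shift); B is stateless: it sorts each window slice with the library sort and sums the (p-k)-indexed element directly.
import Mathlib
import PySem

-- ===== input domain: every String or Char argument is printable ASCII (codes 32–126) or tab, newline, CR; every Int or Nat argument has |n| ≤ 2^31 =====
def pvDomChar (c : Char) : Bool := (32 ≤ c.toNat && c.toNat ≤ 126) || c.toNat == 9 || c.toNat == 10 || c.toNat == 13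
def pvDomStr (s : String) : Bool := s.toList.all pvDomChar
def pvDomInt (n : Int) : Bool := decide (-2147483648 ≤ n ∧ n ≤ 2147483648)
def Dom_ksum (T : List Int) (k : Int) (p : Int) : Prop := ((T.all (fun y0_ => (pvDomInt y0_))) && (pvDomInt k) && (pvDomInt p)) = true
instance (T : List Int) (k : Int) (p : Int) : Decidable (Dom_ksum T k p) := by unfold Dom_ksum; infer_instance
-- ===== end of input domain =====

-- B replaces A's incrementally-maintained sorted window (quicksort + binary-search
-- delete/insert) by a stateless per-window library sort; objective: simpler.


-- ===== PORT A =====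
-- quick_sort
def quickSortA : List Int → List Int
  | [] => []
  | pivot :: rest =>
    quickSortA (rest.filter (fun x => decide (x ≤ pivot))) ++ [pivot] ++
      quickSortA (rest.filter (fun x => decide (pivot < x)))
termination_by l => l.length
decreasing_by
  all_goals
    simp only [List.length_unattach]
    exact Nat.lt_succ_of_le (le_trans (List.length_filter_le _ _) (le_of_eq List.length_attach))

-- the while-loop of makelist
def makeLoopA (T : List Int) (p : Int) (i : Int) (acc : List Int) : List Int :=
  if i < p then makeLoopA T p (i + 1) (acc ++ [PySem.List.pyGetD T i 0]) else acc
termination_by (p - i).toNat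
decreasing_by
  exact (Int.toNat_lt_toNat (Int.sub_pos.mpr ‹i < p›)).mpr (sub_lt_sub_left (lt_add_one i) p)

-- makelist
def makelistA (T : List Int) (p : Int) : List Int := quickSortA (makeLoopA T p 0 [])

-- the while-loop of binary_search
def bsLoopA (arr : List Int) (target : Int) (left : Int) (right : Int) : Int :=
  if left ≤ right then
    let mid := PySem.Int.floordiv (left + right) 2
    match PySem.List.pyGet? arr mid with
    | some v =>
      if v = target then mid
      else if v < target then bsLoopA arr target (mid + 1) right
      else bsLoopA arr target left (mid - 1)
    | none => left   -- IndexError in Python; unreachable for 0 ≤ left ≤ right < len arr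
  else left
termination_by (right - left + 1).toNat
decreasing_by
  · exact (Int.toNat_lt_toNat (Int.lt_add_one_of_le (Int.sub_nonneg.mpr ‹left ≤ right›))).mpr
      (Int.add_lt_add_right
        (sub_lt_sub_left (Int.lt_add_one_of_le (PySem.Int.floordiv_two_mid_bounds ‹left ≤ right›).1) right) 1)
  · exact (Int.toNat_lt_toNat (Int.lt_add_one_of_le (Int.sub_nonneg.mpr ‹left ≤ right›))).mpr
      (Int.add_lt_add_right
        (sub_lt_sub_right (lt_of_lt_of_le (sub_one_lt _) (PySem.Int.floordiv_two_mid_bounds ‹left ≤ right›).2) left) 1)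

-- binary_search
def bsearchA (arr : List Int) (target : Int) : Int :=
  bsLoopA arr target 0 (PySem.List.len arr - 1)

-- changelist ('del templist[the_ind]' = pop at the index, value discarded)
def changeA (T : List Int) (i : Int) (templist : List Int) (p : Int) : List Int :=
  let theInd := bsearchA templist (PySem.List.pyGetD T i 0)
  let tl1 := match PySem.List.pop? templist theInd with
             | some r => r.2
             | none => templist   -- IndexError in Python; unreachable on the admitted inputs
  PySem.List.insert tl1 (bsearchA tl1 (PySem.List.pyGetD T (p + i) 0)) (PySem.List.pyGetD T (p + i) 0)

-- the main while-loop of ksum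
def ksumLoopA (T : List Int) (k : Int) (p : Int) (n : Int) (i : Int) (templist : List Int) (sum : Int) : Int :=
  if i + p < n then
    let templist' := changeA T i templist p
    ksumLoopA T k p n (i + 1) templist' (sum + PySem.List.pyGetD templist' (p - k) 0)
  else sum
termination_by (n - p - i).toNat
decreasing_by
  exact (Int.toNat_lt_toNat (Int.sub_pos.mpr (Int.lt_sub_right_of_add_lt ‹i + p < n›))).mpr
    (sub_lt_sub_left (lt_add_one i) (n - p))

def ksum (T : List Int) (k : Int) (p : Int) : Int :=
  let n : Int := PySem.List.len T
  let templist := makelistA T p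
  let sum := PySem.List.pyGetD templist (p - k) 0
  ksumLoopA T k p n 0 templist sum

-- ===== PORT B =====
def ksum_alt (T : List Int) (k : Int) (p : Int) : Int :=
  let n : Int := PySem.List.len T
  (PySem.List.pyRange 0 (n - p + 1) 1).foldl
    (fun total s =>
      total + PySem.List.pyGetD
        (PySem.List.sorted (PySem.List.slice T (some s) (some (s + p))) (fun x => x) false)
        (p - k) 0)
    0

-- ===== PRECONDITION & SPEC =====
-- Pre_ksum is exactly where the Python A returns: p must be a valid window size
-- (1 ≤ p ≤ len T, else makelist / the first templist[p-k] raises IndexError) and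
-- p-k must be a valid Python index into the window of length p (1 ≤ k ≤ 2p).
def Pre_ksum (T : List Int) (k : Int) (p : Int) : Prop :=
  1 ≤ p ∧ p ≤ T.length ∧ 1 ≤ k ∧ k ≤ 2 * p
instance (T : List Int) (k : Int) (p : Int) : Decidable (Pre_ksum T k p) := by
  unfold Pre_ksum; infer_instance

def pvWitness_ksum : List Int × Int × Int := ([3, 1, 4, 1, 5], 2, 3)

def Spec_ksum (T : List Int) (k : Int) (p : Int) (out : Int) : Prop := out = ksum_alt T k p
instance (T : List Int) (k : Int) (p : Int) (out : Int) : Decidable (Spec_ksum T k p out) := by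
  unfold Spec_ksum; infer_instance

-- ===== CLAIM (what is proved, stated in full; the proofs are below) =====
def Claim_equal_ksum : Prop := ∀ (T : List Int) (k : Int) (p : Int), Dom_ksum T k p → Pre_ksum T k p → Spec_ksum T k p (ksum T k p)

-- ===== LEMMAS AND PROOFS =====

theorem quickSortA_perm_pairwise (N : Nat) : ∀ xs : List Int, xs.length ≤ N →
    (quickSortA xs).Perm xs ∧ (quickSortA xs).Pairwise (· ≤ ·) := by
  induction N with
  | zero =>
    intro xs h
    have : xs = [] := List.eq_nil_of_length_eq_zero (Nat.le_zero.mp h)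
    subst this; rw [quickSortA]; exact ⟨List.Perm.refl _, List.Pairwise.nil⟩
  | succ N ih =>
    intro xs h
    match xs with
    | [] => rw [quickSortA]; exact ⟨List.Perm.refl _, List.Pairwise.nil⟩
    | pivot :: rest =>
      rw [quickSortA]
      have hle := ih (rest.filter (fun x => decide (x ≤ pivot)))
        (le_trans (List.length_filter_le _ _) (by simpa using h))
      have hgt := ih (rest.filter (fun x => decide (pivot < x)))
        (le_trans (List.length_filter_le _ _) (by simpa using h))
      have hperm : (quickSortA (rest.filter (fun x => decide (x ≤ pivot))) ++ [pivot] ++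
          quickSortA (rest.filter (fun x => decide (pivot < x)))).Perm (pivot :: rest) := by
        refine List.Perm.trans ((hle.1.append (List.Perm.refl _)).append hgt.1) ?_
        refine List.Perm.trans (l₂ := pivot :: (rest.filter (fun x => decide (x ≤ pivot)) ++
            rest.filter (fun x => decide (pivot < x))))
          (by rw [List.append_assoc, List.singleton_append]; exact List.perm_middle) ?_
        refine List.Perm.cons _ ?_
        have h2 := List.filter_append_perm (fun x => decide (x ≤ pivot)) rest
        have he : rest.filter (fun x => !decide (x ≤ pivot)) = rest.filter (fun x => decide (pivot < x)) := by
          apply List.filter_congr; intro x _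
          by_cases hx : x ≤ pivot
          · simp [hx, show ¬ pivot < x from not_lt.mpr hx]
          · simp [hx, show pivot < x from not_le.mp hx]
        rw [he] at h2; exact h2
      refine ⟨hperm, ?_⟩
      have m1 : ∀ x ∈ quickSortA (rest.filter (fun x => decide (x ≤ pivot))), x ≤ pivot := by
        intro x hx
        have := hle.1.mem_iff.mp hx
        simpa using (List.mem_filter.mp this).2
      have m2 : ∀ x ∈ quickSortA (rest.filter (fun x => decide (pivot < x))), pivot ≤ x := by
        intro x hx
        have := hgt.1.mem_iff.mp hx
        have := (List.mem_filter.mp this).2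
        simp at this; omega
      rw [List.append_assoc]
      refine List.pairwise_append.mpr ⟨hle.2, ?_, ?_⟩
      · exact List.pairwise_cons.mpr ⟨fun y hy => m2 y hy, hgt.2⟩
      · intro x hx y hy
        rcases List.mem_cons.mp hy with h | h
        · exact h ▸ m1 x hx
        · exact le_trans (m1 x hx) (m2 y h)

theorem quickSortA_eq_sorted' (xs : List Int) :
    quickSortA xs = PySem.List.sorted xs (fun x => x) false :=
  Eq.symm (PySem.List.sorted_id_eq_of_perm_of_pairwise _ _
    (quickSortA_perm_pairwise xs.length xs le_rfl).1
    (quickSortA_perm_pairwise xs.length xs le_rfl).2)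
theorem bsLoopA_spec (arr : List Int) (t : Int) (hs : arr.Pairwise (· ≤ ·)) (M : Nat) :
    ∀ left right : Int, (right - left + 1).toNat ≤ M →
    0 ≤ left → left ≤ right + 1 → right ≤ (arr.length : Int) - 1 →
    (∀ (j : Nat) (hj : j < arr.length), (j : Int) < left → arr[j] < t) →
    (∀ (j : Nat) (hj : j < arr.length), right < (j : Int) → t < arr[j]) →
    0 ≤ bsLoopA arr t left right ∧ bsLoopA arr t left right ≤ arr.length ∧
    (∀ (j : Nat) (hj : j < arr.length), (j : Int) < bsLoopA arr t left right → arr[j] ≤ t) ∧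
    (∀ (j : Nat) (hj : j < arr.length), bsLoopA arr t left right ≤ (j : Int) → t ≤ arr[j]) ∧
    (t ∈ arr → ∃ hj : (bsLoopA arr t left right).toNat < arr.length,
      arr[(bsLoopA arr t left right).toNat] = t) := by
  have ord : ∀ (a b : Nat) (hb : b < arr.length) (hab : a ≤ b), arr[a]'(by omega) ≤ arr[b] := by
    intro a b hb hab
    rcases Nat.lt_or_ge a b with h | h
    · exact (List.pairwise_iff_getElem.mp hs) a b _ hb h
    · have : a = b := le_antisymm hab h
      subst this; exact le_rfl
  induction M with
  | zero =>
    intro left right hM h0 hlr hub hfl hfr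
    have hguard : ¬ left ≤ right := by omega
    rw [bsLoopA, if_neg hguard]
    refine ⟨h0, by omega, ?_, ?_, ?_⟩
    · intro j hj hjl; exact le_of_lt (hfl j hj hjl)
    · intro j hj hjl; exact le_of_lt (hfr j hj (by omega))
    · intro hmem
      exfalso
      obtain ⟨j, hj, hje⟩ := List.mem_iff_getElem.mp hmem
      rcases lt_or_ge (j : Int) left with h | h
      · exact absurd hje (ne_of_lt (hfl j hj h))
      · exact absurd hje (ne_of_gt (hfr j hj (by omega)))
  | succ M ih =>
    intro left right hM h0 hlr hub hfl hfr
    by_cases hguard : left ≤ right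
    · have hmid := PySem.Int.floordiv_two_mid_bounds hguard
      set mid := PySem.Int.floordiv (left + right) 2 with hmiddef
      have hmlt : mid < (arr.length : Int) := by omega
      have hget := PySem.List.pyGet?_eq_some_getElem arr (i := mid) (by omega) hmlt
      have hmn : mid.toNat < arr.length := by omega
      rw [bsLoopA]
      simp only [if_pos hguard, ← hmiddef, hget]
      by_cases heq : arr[mid.toNat] = t
      · simp only [if_pos heq]
        refine ⟨by omega, by omega, ?_, ?_, fun _ => ⟨hmn, heq⟩⟩
        · intro j hj hjm
          calc arr[j] ≤ arr[mid.toNat] := ord j mid.toNat hmn (by omega)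
            _ = t := heq
        · intro j hj hjm
          calc t = arr[mid.toNat] := heq.symm
            _ ≤ arr[j] := ord mid.toNat j hj (by omega)
      · simp only [if_neg heq]
        by_cases hlt : arr[mid.toNat] < t
        · simp only [if_pos hlt]
          refine ih (mid + 1) right (by omega) (by omega) (by omega) hub ?_ hfr
          intro j hj hjl
          calc arr[j] ≤ arr[mid.toNat] := ord j mid.toNat hmn (by omega)
            _ < t := hlt
        · simp only [if_neg hlt]
          refine ih left (mid - 1) (by omega) h0 (by omega) (by omega) hfl ?_
          intro j hj hjr
          have h1 : arr[mid.toNat] ≤ arr[j] := ord mid.toNat j hj (by omega)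
          have h2 : t < arr[mid.toNat] := lt_of_le_of_ne (by omega) (Ne.symm heq)
          omega
    · rw [bsLoopA, if_neg hguard]
      refine ⟨h0, by omega, ?_, ?_, ?_⟩
      · intro j hj hjl; exact le_of_lt (hfl j hj hjl)
      · intro j hj hjl; exact le_of_lt (hfr j hj (by omega))
      · intro hmem
        exfalso
        obtain ⟨j, hj, hje⟩ := List.mem_iff_getElem.mp hmem
        rcases lt_or_ge (j : Int) left with h | h
        · exact absurd hje (ne_of_lt (hfl j hj h))
        · exact absurd hje (ne_of_gt (hfr j hj (by omega)))

theorem bsearchA_spec (arr : List Int) (t : Int) (hs : arr.Pairwise (· ≤ ·)) :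
    0 ≤ bsearchA arr t ∧ bsearchA arr t ≤ arr.length ∧
    (∀ (j : Nat) (hj : j < arr.length), (j : Int) < bsearchA arr t → arr[j] ≤ t) ∧
    (∀ (j : Nat) (hj : j < arr.length), bsearchA arr t ≤ (j : Int) → t ≤ arr[j]) ∧
    (t ∈ arr → ∃ hj : (bsearchA arr t).toNat < arr.length, arr[(bsearchA arr t).toNat] = t) := by
  have := bsLoopA_spec arr t hs ((arr.length : Int) - 0).toNat 0 ((PySem.List.len arr) - 1)
    (by simp only [PySem.List.len_eq]; omega) le_rfl (by simp only [PySem.List.len_eq]; omega)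
    (by simp only [PySem.List.len_eq]; omega)
    (by intro j hj hjl; omega)
    (by intro j hj hjr; simp only [PySem.List.len_eq] at hjr; omega)
  simpa [bsearchA] using this

def winSorted (T : List Int) (p : Int) (i : Nat) : List Int :=
  PySem.List.sorted ((T.drop i).take p.toNat) (fun x => x)

theorem makeLoopA_spec (T : List Int) (p : Int) (hp : p ≤ (T.length : Int)) (m : Nat) :
    ∀ (i : Int) (acc : List Int), 0 ≤ i → i + m = p →
    makeLoopA T p i acc = acc ++ (T.take p.toNat).drop i.toNat := by
  induction m with
  | zero =>
    intro i acc h0 hm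
    rw [makeLoopA, if_neg (by omega)]
    rw [List.drop_eq_nil_of_le (by simp; omega), List.append_nil]
  | succ m ih =>
    intro i acc h0 hm
    have hip : i < p := by omega
    have hlen : i < (T.length : Int) := by omega
    rw [makeLoopA, if_pos hip, ih (i + 1) _ (by omega) (by omega)]
    have hget : PySem.List.pyGetD T i 0 = T[i.toNat]'(by omega) :=
      PySem.List.pyGetD_eq_getElem T 0 h0 hlen
    have hidx : i.toNat < (T.take p.toNat).length := by simp; omega
    rw [List.drop_eq_getElem_cons hidx]
    have : (T.take p.toNat)[i.toNat] = T[i.toNat]'(by omega) := List.getElem_take ..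
    rw [this, ← hget]
    simp [List.append_assoc]
    omega

theorem makelistA_eq (T : List Int) (p : Int) (h0 : 0 ≤ p) (hp : p ≤ (T.length : Int)) :
    makelistA T p = winSorted T p 0 := by
  rw [makelistA, makeLoopA_spec T p hp p.toNat 0 [] le_rfl (by omega)]
  simp [winSorted, quickSortA_eq_sorted']

theorem changeA_step (T : List Int) (p : Int) (i : Nat) (hp : 1 ≤ p)
    (hn : (i : Int) + p < (T.length : Int)) :
    changeA T i (winSorted T p i) p = winSorted T p (i + 1) := by
  set P := p.toNat with hP
  have hPpos : 1 ≤ P := by omega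
  have hiT : i < T.length := by omega
  have hipT : i + P < T.length := by omega
  set w : List Int := (T.drop i).take P with hw
  set tl : List Int := winSorted T p i with htl
  have htl' : tl = PySem.List.sorted w (fun x => x) := rfl
  have hperm_tl : tl.Perm w := PySem.List.sorted_perm w _ _
  have hpw_tl : tl.Pairwise (· ≤ ·) := PySem.List.sorted_pairwise w (fun x => x)
  have hlen_tl : tl.length = w.length := hperm_tl.length_eq
  have hwlen : w.length = P := by
    rw [hw, List.length_take, List.length_drop]; omega
  have hdropi : T.drop i = T[i] :: T.drop (i + 1) := List.drop_eq_getElem_cons hiT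
  set w' : List Int := (T.drop (i + 1)).take (P - 1) with hw'
  have hw_cons : w = T[i] :: w' := by
    rw [hw, hdropi, show P = (P - 1) + 1 by omega, List.take_succ_cons]
  have hmem : T[i] ∈ tl := by
    rw [htl', PySem.List.mem_sorted, hw_cons]; exact List.mem_cons_self ..
  have hTi : PySem.List.pyGetD T (i : Int) 0 = T[i] := by
    have h := PySem.List.pyGetD_eq_getElem T (i := (i : Int)) 0 (by omega) (by omega)
    simpa using h
  obtain ⟨hb0, hble, hbfl, hbfr, hbmem⟩ := bsearchA_spec tl T[i] hpw_tl
  obtain ⟨hrlt, hrval⟩ := hbmem hmem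
  set r : Int := bsearchA tl T[i] with hr
  set tl1 : List Int := tl.eraseIdx r.toNat with htl1
  have hpop : PySem.List.pop? tl r = some (T[i], tl1) := by
    have h := PySem.List.pop?_natCast tl r.toNat hrlt
    rw [hrval] at h
    rw [Int.toNat_of_nonneg hb0] at h
    exact h
  have hpw_tl1 : tl1.Pairwise (· ≤ ·) :=
    List.Pairwise.sublist (List.eraseIdx_sublist ..) hpw_tl
  have hperm1 : tl.Perm (T[i] :: tl1) := by
    have h1 : tl.Perm (tl[r.toNat] :: (tl.take r.toNat ++ tl.drop (r.toNat + 1))) := by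
      conv_lhs => rw [← List.take_append_drop r.toNat tl, List.drop_eq_getElem_cons hrlt]
      exact List.perm_middle
    rw [hrval] at h1
    rw [htl1, List.eraseIdx_eq_take_drop_succ]
    exact h1
  have hperm1' : tl1.Perm w' := by
    have h2 : (T[i] :: tl1).Perm (T[i] :: w') :=
      (hperm1.symm.trans (hperm_tl.trans (by rw [hw_cons])))
    exact h2.cons_inv
  have hv : PySem.List.pyGetD T (p + (i : Int)) 0 = T[i + P]'hipT := by
    have h := PySem.List.pyGetD_eq_getElem T (i := p + (i : Int)) 0 (by omega) (by omega)
    have hidx : (p + (i : Int)).toNat = i + P := by omega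
    simp only [hidx] at h
    exact h
  set v : Int := T[i + P]'hipT with hvv
  obtain ⟨hc0, hcle, hcfl, hcfr, _⟩ := bsearchA_spec tl1 v hpw_tl1
  set r' : Int := bsearchA tl1 v with hr'
  have hins : PySem.List.insert tl1 r' v = tl1.take r'.toNat ++ v :: tl1.drop r'.toNat := by
    have h := PySem.List.insert_natCast tl1 r'.toNat v (by omega)
    rw [Int.toNat_of_nonneg hc0] at h
    exact h
  set tl2 : List Int := tl1.take r'.toNat ++ v :: tl1.drop r'.toNat with htl2
  have hpw_tl2 : tl2.Pairwise (· ≤ ·) := by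
    rw [htl2]
    refine List.pairwise_append.mpr
      ⟨List.Pairwise.sublist (List.take_sublist ..) hpw_tl1, ?_, ?_⟩
    · refine List.pairwise_cons.mpr ⟨?_, List.Pairwise.sublist (List.drop_sublist ..) hpw_tl1⟩
      intro y hy
      obtain ⟨j, hj, hje⟩ := List.mem_iff_getElem.mp hy
      rw [List.getElem_drop] at hje
      exact hje ▸ hcfr (r'.toNat + j) (by simp at hj; omega) (by omega)
    · intro x hx y hy
      obtain ⟨j, hj, hje⟩ := List.mem_iff_getElem.mp hx
      rw [List.getElem_take] at hje
      have hjlt : j < tl1.length := by simp at hj; omega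
      have hxle : x ≤ v := hje ▸ hcfl j hjlt (by simp at hj; omega)
      rcases List.mem_cons.mp hy with h | h
      · exact h ▸ hxle
      · obtain ⟨j', hj', hje'⟩ := List.mem_iff_getElem.mp h
        rw [List.getElem_drop] at hje'
        rw [List.length_drop] at hj'
        exact le_trans hxle (hje' ▸ hcfr (r'.toNat + j') (by omega) (by omega))
  have hwin1 : (T.drop (i + 1)).take P = w' ++ [v] := by
    rw [hw', show P = (P - 1) + 1 by omega, List.take_add_one]
    congr 1
    rw [List.getElem?_drop, show i + 1 + (P - 1) = i + P from by omega,
      List.getElem?_eq_getElem hipT]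
    rfl
  have hperm2 : tl2.Perm ((T.drop (i + 1)).take P) := by
    have s1 : tl2.Perm (v :: tl1) := by
      rw [htl2]
      have hmid := List.perm_middle (a := v) (l₁ := tl1.take r'.toNat) (l₂ := tl1.drop r'.toNat)
      rwa [List.take_append_drop] at hmid
    have s2 : (v :: tl1).Perm (v :: w') := hperm1'.cons v
    have s3 : (v :: w').Perm (w' ++ [v]) := (List.perm_append_singleton v w').symm
    rw [hwin1]
    exact (s1.trans s2).trans s3
  have hfin : winSorted T p (i + 1) = tl2 :=
    PySem.List.sorted_id_eq_of_perm_of_pairwise _ _ hperm2 hpw_tl2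
  rw [hfin, changeA]
  simp only [hTi, ← hr, hpop, hv, ← hr', hins]

def gterm (T : List Int) (k : Int) (p : Int) (s : Int) : Int :=
  PySem.List.pyGetD
    (PySem.List.sorted (PySem.List.slice T (some s) (some (s + p))) (fun x => x) false)
    (p - k) 0

theorem gterm_eq (T : List Int) (k p : Int) (i : Nat) (h0p : 0 ≤ p) :
    gterm T k p (i : Int) = PySem.List.pyGetD (winSorted T p i) (p - k) 0 := by
  rw [gterm, winSorted, PySem.List.slice_toNat T (by omega) (by omega),
    show ((i : Int) + p).toNat - ((i : Int)).toNat = p.toNat from by omega,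
    Int.toNat_natCast]

theorem ksumLoopA_spec (T : List Int) (k p : Int) (hp : 1 ≤ p) (m : Nat) :
    ∀ (i : Nat) (sum : Int), (i : Int) + p + m = (T.length : Int) →
    ksumLoopA T k p (T.length : Int) (i : Int) (winSorted T p i) sum
      = sum + ((PySem.List.pyRange ((i : Int) + 1) ((T.length : Int) - p + 1) 1).map
          (gterm T k p)).sum := by
  induction m with
  | zero =>
    intro i sum hm
    rw [ksumLoopA, if_neg (by omega), PySem.List.pyRange_one_eq_nil (by omega)]
    simp
  | succ m ih =>
    intro i sum hm
    rw [ksumLoopA, if_pos (by omega : (i : Int) + p < (T.length : Int))]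
    rw [changeA_step T p i hp (by omega)]
    have hcast : (i : Int) + 1 = ((i + 1 : Nat) : Int) := by push_cast; ring
    rw [hcast, ih (i + 1) _ (by push_cast; omega)]
    rw [PySem.List.pyRange_one_cons (a := ((i + 1 : Nat) : Int)) (by push_cast; omega)]
    rw [List.map_cons, List.sum_cons, gterm_eq T k p (i + 1) (by omega)]
    ring

-- ===== VERDICT (by name: the statement is the Claim_ definition above) =====
theorem ksum_spec : Claim_equal_ksum := by
  unfold Claim_equal_ksum
  intro T k p _ hpre
  obtain ⟨hp1, hpn, hk1, hk2⟩ := hpre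
  unfold Spec_ksum ksum ksum_alt
  simp only [PySem.List.len_eq]
  rw [makelistA_eq T p (by omega) (by omega)]
  have hloop := ksumLoopA_spec T k p hp1 ((T.length : Int) - p).toNat 0
    (PySem.List.pyGetD (winSorted T p 0) (p - k) 0) (by omega)
  simp only [Nat.cast_zero] at hloop
  rw [hloop]
  rw [PySem.List.foldl_add]
  rw [PySem.List.pyRange_one_cons (a := 0) (by omega)]
  rw [List.map_cons, List.sum_cons]
  have hg0 : gterm T k p ((0 : Nat) : Int) = PySem.List.pyGetD (winSorted T p 0) (p - k) 0 :=
    gterm_eq T k p 0 (by omega)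
  simp only [Nat.cast_zero] at hg0
  have hrfl : PySem.List.pyGetD
      (PySem.List.sorted (PySem.List.slice T (some 0) (some (0 + p))) (fun x => x) false)
      (p - k) 0 = gterm T k p 0 := rfl
  have hfun : (fun s => PySem.List.pyGetD
      (PySem.List.sorted (PySem.List.slice T (some s) (some (s + p))) (fun x => x) false)
      (p - k) 0) = gterm T k p := rfl
  rw [hrfl, hg0, hfun]
  exact (zero_add _).symm
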